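-- pv_equiv track=rewrite | github.com/PatrikBujna/Bc | main.py | upravStriedaniaBezSkr
-- ===== SOURCE A (Python) =====
-- def upravHracov(mena, frekventovane):
--     for i, hrac in enumerate(mena):
--         x = hrac.split()
--         mena[i] = x[-1]
--
--     for frek in frekventovane:
--         for i, hrac in enumerate(mena):
--             x = hrac.split()
--             if frek == x[-1]:
--                 mena[i] = x[0][:1] + ". " + ''.join(x[0:])
--
--     return mena
--
-- def upravStriedaniaBezSkr(striedania, frekventovane):
--     mena = []
--     casy = []
--     count = 0
--
--     while (count < len(striedania)):
--         temp = striedania[count]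
--         prvy = temp[:temp.find(" <")]
--         mena.append(prvy)
--
--         druhy = temp[temp.find(">") + 2:temp.find(" (")]
--         mena.append(druhy)
--
--         cas = str(temp[temp.find(" ("):temp.find(")")]).replace("'", ". ")
--         casy.append(cas)
--
--         count += 1
--
--     upravene = upravHracov(mena, frekventovane)
--     count = 0
--     i = 0
--     while (count < len(striedania)):
--         striedania[count] = upravene[i] + casy[count] + upravene[i + 1] + ")"
--         count += 1
--         i += 2
--
--     return striedania
-- ===== SOURCE B (Python) =====
-- def upravStriedaniaBezSkr(striedania, frekventovane):
--     def f(name):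
--         s = name.split()[-1]
--         for frek in frekventovane:
--             x = s.split()
--             if frek == x[-1]:
--                 s = x[0][:1] + ". " + ''.join(x)
--         return s
--
--     for count in range(len(striedania)):
--         temp = striedania[count]
--         prvy = temp[:temp.find(" <")]
--         druhy = temp[temp.find(">") + 2:temp.find(" (")]
--         cas = temp[temp.find(" ("):temp.find(")")].replace("'", ". ")
--         striedania[count] = f(prvy) + cas + f(druhy) + ")"
--     return striedania
-- ===== Notes on version B (the rewrite author's own statement) =====
-- stated objective: simpler
-- what changed: One in-place loop over striedania with a per-name helper that folds the frekventovane abbreviation cascade directly, replacing A's three passes over intermediate mena/casy parallel arrays and the index-paired reassembly.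
import Mathlib
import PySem

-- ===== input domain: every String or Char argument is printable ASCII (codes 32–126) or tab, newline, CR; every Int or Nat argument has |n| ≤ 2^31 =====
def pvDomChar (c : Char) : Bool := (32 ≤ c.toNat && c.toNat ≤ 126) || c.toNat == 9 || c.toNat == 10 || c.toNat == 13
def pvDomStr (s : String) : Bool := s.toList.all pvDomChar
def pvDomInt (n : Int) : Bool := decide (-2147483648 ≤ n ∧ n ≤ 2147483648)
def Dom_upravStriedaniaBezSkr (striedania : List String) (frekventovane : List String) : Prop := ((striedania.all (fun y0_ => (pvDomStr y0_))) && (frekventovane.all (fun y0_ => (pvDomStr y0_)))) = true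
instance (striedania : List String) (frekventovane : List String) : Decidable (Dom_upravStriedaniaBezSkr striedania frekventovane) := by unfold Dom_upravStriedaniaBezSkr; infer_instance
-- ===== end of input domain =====

-- B replaces A's three passes over parallel mena/casy arrays by one in-place loop with a
-- per-name abbreviation fold (same cost; both mutate striedania in place and return it —
-- the equivalence proved here is about the return value).

-- shared transliterations of the identical slicing/abbreviation expressions of both Pythons
-- prvy = temp[:temp.find(" <")]
def pvPrvy (temp : String) : String :=
  PySem.Str.slice temp none (some (PySem.Str.find temp " <"))
-- druhy = temp[temp.find(">") + 2:temp.find(" (")]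
def pvDruhy (temp : String) : String :=
  PySem.Str.slice temp (some (PySem.Str.find temp ">" + 2)) (some (PySem.Str.find temp " ("))
-- cas = temp[temp.find(" ("):temp.find(")")].replace("'", ". ")
def pvCas (temp : String) : String :=
  PySem.Str.replace (PySem.Str.slice temp (some (PySem.Str.find temp " (")) (some (PySem.Str.find temp ")"))) "'" ". "
-- hrac.split()[-1]  (IndexError when the split is empty: excluded by Pre_, default never read there)
def pvLast (s : String) : String := ((PySem.List.pyGet? (PySem.Str.split₀ s) (-1)).getD "")

-- ===== PORT A =====
-- body of the inner match of upravHracov's second loop: x[0][:1] + ". " + ''.join(x[0:])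
def pvStepA (frek : String) (s : String) : String :=
  let x := PySem.Str.split₀ s
  if frek == ((PySem.List.pyGet? x (-1)).getD "") then
    PySem.Str.slice ((PySem.List.pyGet? x 0).getD "") none (some 1) ++ ". " ++
      PySem.Str.join "" (PySem.List.slice x (some 0) none)
  else s

def upravHracov (mena : List String) (frekventovane : List String) : List String :=
  -- first loop: mena[i] = hrac.split()[-1]
  let mena1 := mena.map pvLast
  -- second loop: for frek in frekventovane: for i, hrac in enumerate(mena): …
  frekventovane.foldl (fun m frek => m.map (pvStepA frek)) mena1

-- first while loop: builds mena (two appends per entry) and casy (one append per entry)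
def pvBuild : List String → List String × List String
  | [] => ([], [])
  | temp :: rest =>
    let mc := pvBuild rest
    (pvPrvy temp :: pvDruhy temp :: mc.1, pvCas temp :: mc.2)

-- second while loop: striedania[count] = upravene[i] + casy[count] + upravene[i+1] + ")"
def pvAssemble : List String → List String → List String
  | a :: b :: up, c :: cs => (a ++ c ++ b ++ ")") :: pvAssemble up cs
  | _, _ => []

def upravStriedaniaBezSkr (striedania : List String) (frekventovane : List String) : List String :=
  let mc := pvBuild striedania
  let upravene := upravHracov mc.1 frekventovane
  pvAssemble upravene mc.2

-- ===== PORT B =====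
-- the loop body of B's helper f: x = s.split(); if frek == x[-1]: s = x[0][:1] + ". " + ''.join(x)
def pvStepB (frek : String) (s : String) : String :=
  let x := PySem.Str.split₀ s
  if frek == ((PySem.List.pyGet? x (-1)).getD "") then
    PySem.Str.slice ((PySem.List.pyGet? x 0).getD "") none (some 1) ++ ". " ++ PySem.Str.join "" x
  else s

-- helper f(name)
def pvF (frekventovane : List String) (name : String) : String :=
  frekventovane.foldl (fun s frek => pvStepB frek s) (pvLast name)

def upravStriedaniaBezSkr_alt (striedania : List String) (frekventovane : List String) : List String :=
  striedania.map (fun temp =>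
    pvF frekventovane (pvPrvy temp) ++ pvCas temp ++ pvF frekventovane (pvDruhy temp) ++ ")")

-- ===== PRECONDITION & SPEC =====
-- Pre_ excludes exactly the inputs where both Pythons raise IndexError: an entry whose
-- extracted prvy or druhy slice splits to the empty word list (x[-1] on an empty list).
def Pre_upravStriedaniaBezSkr (striedania : List String) (frekventovane : List String) : Prop :=
  ∀ s ∈ striedania, PySem.Str.split₀ (pvPrvy s) ≠ [] ∧ PySem.Str.split₀ (pvDruhy s) ≠ []
instance (striedania : List String) (frekventovane : List String) : Decidable (Pre_upravStriedaniaBezSkr striedania frekventovane) := by unfold Pre_upravStriedaniaBezSkr; infer_instance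
def pvWitness_upravStriedaniaBezSkr : List String × List String :=
  (["Jan Novak <5> Peter Kovac (12'30"], ["Novak"])

def Spec_upravStriedaniaBezSkr (striedania : List String) (frekventovane : List String) (out : List String) : Prop := out = upravStriedaniaBezSkr_alt striedania frekventovane
instance (striedania : List String) (frekventovane : List String) (out : List String) : Decidable (Spec_upravStriedaniaBezSkr striedania frekventovane out) := by unfold Spec_upravStriedaniaBezSkr; infer_instance

-- ===== CLAIM (what is proved, stated in full; the proofs are below) =====
def Claim_equal_upravStriedaniaBezSkr : Prop := ∀ (striedania : List String) (frekventovane : List String), Dom_upravStriedaniaBezSkr striedania frekventovane → Pre_upravStriedaniaBezSkr striedania frekventovane → Spec_upravStriedaniaBezSkr striedania frekventovane (upravStriedaniaBezSkr striedania frekventovane)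

-- ===== LEMMAS AND PROOFS =====

-- A's step and B's step agree: x[0:] is x itself
theorem pvStep_eq (frek s : String) : pvStepA frek s = pvStepB frek s := by
  simp [pvStepA, pvStepB, PySem.List.slice_none_none]

-- a fold of whole-list maps is a map of per-element folds
theorem fold_map (fs : List String) (l : List String) :
    fs.foldl (fun m frek => m.map (pvStepA frek)) l
      = l.map (fun s => fs.foldl (fun s frek => pvStepB frek s) s) := by
  induction fs generalizing l with
  | nil => simp
  | cons f fs ih =>
    simp only [List.foldl_cons, ih, List.map_map]
    exact List.map_congr_left (fun s _ => by simp [Function.comp, pvStep_eq])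

theorem upravHracov_eq (mena fs : List String) :
    upravHracov mena fs = mena.map (pvF fs) := by
  simp only [upravHracov, fold_map, List.map_map]
  rfl

-- reassembly of the flattened processed names equals the per-entry map
theorem assemble_build (g : String → String) (st : List String) :
    pvAssemble ((pvBuild st).1.map g) ((pvBuild st).2)
      = st.map (fun t => g (pvPrvy t) ++ pvCas t ++ g (pvDruhy t) ++ ")") := by
  induction st with
  | nil => simp [pvBuild, pvAssemble]
  | cons t rest ih => simp [pvBuild, pvAssemble, ih]

-- ===== VERDICT (by name: the statement is the Claim_ definition above) =====
theorem upravStriedaniaBezSkr_spec : Claim_equal_upravStriedaniaBezSkr := by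
  intro striedania frekventovane _ _
  unfold Spec_upravStriedaniaBezSkr upravStriedaniaBezSkr upravStriedaniaBezSkr_alt
  simp only [upravHracov_eq, assemble_build]
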